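-- pv_equiv track=rewrite | github.com/arodrigues-APS/APS_Database | data_processing_scripts/irradiation_ingestion.py | map_irrad_columns
-- ===== SOURCE A (Python) =====
-- def map_irrad_columns(headers, row):
--     """
--     Map Keithley .txt columns to the standard measurement schema.
--
--     Handles the column naming variants across campaigns:
--       - Vg / Vgs / Vd / Vds  (gate/drain voltage)
--       - Ig / Igs / Id / Ids  (gate/drain current)
--       - time                 (time column)
--       - fluence, arduino_ms  (extra columns, stored as metadata)
--
--     Returns dict with keys: v_gate, i_gate, v_drain, i_drain, time_val
--     """
--     result = {
--         'v_gate': None, 'i_gate': None,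
--         'v_drain': None, 'i_drain': None,
--         'time_val': None,
--     }
--
--     for i, h in enumerate(headers):
--         if i >= len(row):
--             break
--         val = row[i]
--         hl = h.lower().strip()
--
--         if hl in ('vg', 'vgs'):
--             result['v_gate'] = val
--         elif hl in ('ig', 'igs'):
--             result['i_gate'] = val
--         elif hl in ('vd', 'vds'):
--             result['v_drain'] = val
--         elif hl in ('id', 'ids'):
--             result['i_drain'] = val
--         elif hl in ('time', 'time_val', 't'):
--             result['time_val'] = val
--
--     return result
-- ===== SOURCE B (Python) =====
-- _SYNONYMS = [
--     ('v_gate', ('vg', 'vgs')),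
--     ('i_gate', ('ig', 'igs')),
--     ('v_drain', ('vd', 'vds')),
--     ('i_drain', ('id', 'ids')),
--     ('time_val', ('time', 'time_val', 't')),
-- ]
--
--
-- def _pick(pairs, names):
--     """Value of the last column whose normalized header is in names, else None."""
--     for hl, v in reversed(pairs):
--         if hl in names:
--             return v
--     return None
--
--
-- def map_irrad_columns(headers, row):
--     pairs = [(h.lower().strip(), v) for h, v in zip(headers, row)]
--     return {key: _pick(pairs, names) for key, names in _SYNONYMS}
-- ===== Notes on version B (the rewrite author's own statement) =====
-- stated objective: alternative
-- what changed: Instead of A's single indexed pass that mutates a result dict through an if/elif cascade (last write wins implicitly), B normalizes the zipped header/value pairs once and then builds the result output-driven: for each of the five schema keys it does a reverse search for the last matching column, making the last-write-wins rule explicit and eliminating the mutable accumulator.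
import Mathlib
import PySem

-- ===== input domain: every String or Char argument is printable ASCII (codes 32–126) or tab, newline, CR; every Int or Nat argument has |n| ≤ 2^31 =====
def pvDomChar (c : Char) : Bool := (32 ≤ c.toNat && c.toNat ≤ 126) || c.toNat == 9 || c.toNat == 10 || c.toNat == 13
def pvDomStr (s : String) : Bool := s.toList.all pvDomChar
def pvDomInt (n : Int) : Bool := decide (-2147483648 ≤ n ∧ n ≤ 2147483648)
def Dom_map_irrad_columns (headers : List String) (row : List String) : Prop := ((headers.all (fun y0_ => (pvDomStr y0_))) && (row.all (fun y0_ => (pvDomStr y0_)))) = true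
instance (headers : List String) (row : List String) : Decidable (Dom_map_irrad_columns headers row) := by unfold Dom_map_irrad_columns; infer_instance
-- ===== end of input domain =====

-- B replaces A's mutating indexed pass (if/elif cascade, last write wins implicitly) by an
-- output-driven build: normalize the zipped pairs once, then answer each schema key by a
-- reverse search for its last matching column (alternative decomposition; same cost).

-- ===== PORT A =====
def irradInitA : PySem.Dict String (Option String) :=
  PySem.Dict.ofList [("v_gate", none), ("i_gate", none), ("v_drain", none), ("i_drain", none), ("time_val", none)]

-- one iteration body of A's loop (the if/elif cascade on the lowered/stripped header)
def irradStepA (result : PySem.Dict String (Option String)) (h val : String) :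
    PySem.Dict String (Option String) :=
  let hl := PySem.Str.strip (PySem.Str.lower h)
  if hl = "vg" ∨ hl = "vgs" then result.insert "v_gate" (some val)
  else if hl = "ig" ∨ hl = "igs" then result.insert "i_gate" (some val)
  else if hl = "vd" ∨ hl = "vds" then result.insert "v_drain" (some val)
  else if hl = "id" ∨ hl = "ids" then result.insert "i_drain" (some val)
  else if hl = "time" ∨ hl = "time_val" ∨ hl = "t" then result.insert "time_val" (some val)
  else result

def irradLoopA (items : List (Int × String)) (row : List String)
    (result : PySem.Dict String (Option String)) : PySem.Dict String (Option String) :=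
  match items with
  | [] => result
  | (i, h) :: rest =>
    if (row.length : Int) ≤ i then result
    else
      let val := PySem.List.pyGetD row i ""   -- in range here, equals row[i]
      irradLoopA rest row (irradStepA result h val)

def map_irrad_columns (headers : List String) (row : List String) : List (String × Option String) :=
  (irradLoopA (PySem.List.enumerate headers 0) row irradInitA).items

-- ===== PORT B =====
def irradSyn : List (String × List String) :=
  [("v_gate", ["vg", "vgs"]), ("i_gate", ["ig", "igs"]), ("v_drain", ["vd", "vds"]),
   ("i_drain", ["id", "ids"]), ("time_val", ["time", "time_val", "t"])]

-- _pick: value of the last pair whose normalized header is in names, else none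
def irradPick (pairs : List (String × String)) (names : List String) : Option String :=
  (pairs.reverse.find? (fun p => names.contains p.1)).map (fun p => p.2)

def map_irrad_columns_alt (headers : List String) (row : List String) : List (String × Option String) :=
  let pairs := (headers.zip row).map (fun p => (PySem.Str.strip (PySem.Str.lower p.1), p.2))
  irradSyn.map (fun kn => (kn.1, irradPick pairs kn.2))

-- ===== PRECONDITION & SPEC =====
def Spec_map_irrad_columns (headers : List String) (row : List String) (out : List (String × Option String)) : Prop := out = map_irrad_columns_alt headers row
instance (headers : List String) (row : List String) (out : List (String × Option String)) : Decidable (Spec_map_irrad_columns headers row out) := by unfold Spec_map_irrad_columns; infer_instance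

-- ===== CLAIM =====
def Claim_equal_map_irrad_columns : Prop := ∀ (headers : List String) (row : List String), Dom_map_irrad_columns headers row → Spec_map_irrad_columns headers row (map_irrad_columns headers row)

-- ===== LEMMAS AND PROOFS =====

-- pick over normalized pairs, on the raw zipped pairs
def irradPickRaw (ps : List (String × String)) (names : List String) : Option String :=
  irradPick (ps.map (fun p => (PySem.Str.strip (PySem.Str.lower p.1), p.2))) names

lemma irradPickRaw_append (ps : List (String × String)) (p : String × String) (names : List String) :
    irradPickRaw (ps ++ [p]) names
      = if names.contains (PySem.Str.strip (PySem.Str.lower p.1)) then some p.2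
        else irradPickRaw ps names := by
  unfold irradPickRaw irradPick
  simp only [List.map_append, List.map_cons, List.map_nil, List.reverse_append,
    List.reverse_cons, List.reverse_nil, List.nil_append, List.cons_append, List.find?_cons]
  split <;> simp_all

-- A's loop with the index/break equals a fold of the cascade over headers zipped with the row tail.
lemma irradLoop_eq (headers : List String) :
    ∀ (row : List String) (s : Nat) (result : PySem.Dict String (Option String)),
      irradLoopA (PySem.List.enumerate headers (s : Int)) row result
        = (headers.zip (row.drop s)).foldl (fun r p => irradStepA r p.1 p.2) result := by
  induction headers with
  | nil => intro row s result; simp [PySem.List.enumerate_nil, irradLoopA]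
  | cons h hs ih =>
    intro row s result
    rw [PySem.List.enumerate_cons]
    by_cases hle : row.length ≤ s
    · have : (row.length : Int) ≤ (s : Int) := by exact_mod_cast hle
      simp [irradLoopA, this, List.drop_eq_nil_of_le hle]
    · rw [not_le] at hle
      have hlt : ¬ ((row.length : Int) ≤ (s : Int)) := by exact_mod_cast not_le.mpr hle
      have hdrop : row.drop s = row[s] :: row.drop (s + 1) :=
        List.drop_eq_getElem_cons hle
      have hget : PySem.List.pyGetD row (s : Int) "" = row[s] := by
        rw [PySem.List.pyGetD_natCast]
        simp [List.getD, hle]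
      simp only [irradLoopA, hlt, if_false, hget, hdrop, List.zip_cons_cons, List.foldl_cons]
      have : ((s : Int) + 1) = ((s + 1 : Nat) : Int) := by push_cast; ring
      rw [this, ih]

-- Invariant: after folding the cascade over ps, each of the five entries holds the value
-- of the LAST matching column of ps (B's reverse-search characterization).
lemma irradStep_case (q1 q2 q3 q4 q5 : Option String) (hl v : String) :
    (if hl = "vg" ∨ hl = "vgs" then
        (PySem.Dict.mk [("v_gate", q1), ("i_gate", q2), ("v_drain", q3), ("i_drain", q4), ("time_val", q5)]).insert "v_gate" (some v)
     else if hl = "ig" ∨ hl = "igs" then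
        (PySem.Dict.mk [("v_gate", q1), ("i_gate", q2), ("v_drain", q3), ("i_drain", q4), ("time_val", q5)]).insert "i_gate" (some v)
     else if hl = "vd" ∨ hl = "vds" then
        (PySem.Dict.mk [("v_gate", q1), ("i_gate", q2), ("v_drain", q3), ("i_drain", q4), ("time_val", q5)]).insert "v_drain" (some v)
     else if hl = "id" ∨ hl = "ids" then
        (PySem.Dict.mk [("v_gate", q1), ("i_gate", q2), ("v_drain", q3), ("i_drain", q4), ("time_val", q5)]).insert "i_drain" (some v)
     else if hl = "time" ∨ hl = "time_val" ∨ hl = "t" then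
        (PySem.Dict.mk [("v_gate", q1), ("i_gate", q2), ("v_drain", q3), ("i_drain", q4), ("time_val", q5)]).insert "time_val" (some v)
     else PySem.Dict.mk [("v_gate", q1), ("i_gate", q2), ("v_drain", q3), ("i_drain", q4), ("time_val", q5)])
    = PySem.Dict.mk
        [("v_gate", if ["vg", "vgs"].contains hl then some v else q1),
         ("i_gate", if ["ig", "igs"].contains hl then some v else q2),
         ("v_drain", if ["vd", "vds"].contains hl then some v else q3),
         ("i_drain", if ["id", "ids"].contains hl then some v else q4),
         ("time_val", if ["time", "time_val", "t"].contains hl then some v else q5)] := by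
  by_cases h1 : hl = "vg"
  · subst h1; apply PySem.Dict.ext; simp [PySem.Dict.items_insert_of_contains]
  by_cases h2 : hl = "vgs"
  · subst h2; apply PySem.Dict.ext; simp [PySem.Dict.items_insert_of_contains]
  by_cases h3 : hl = "ig"
  · subst h3; apply PySem.Dict.ext; simp [PySem.Dict.items_insert_of_contains]
  by_cases h4 : hl = "igs"
  · subst h4; apply PySem.Dict.ext; simp [PySem.Dict.items_insert_of_contains]
  by_cases h5 : hl = "vd"
  · subst h5; apply PySem.Dict.ext; simp [PySem.Dict.items_insert_of_contains]
  by_cases h6 : hl = "vds"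
  · subst h6; apply PySem.Dict.ext; simp [PySem.Dict.items_insert_of_contains]
  by_cases h7 : hl = "id"
  · subst h7; apply PySem.Dict.ext; simp [PySem.Dict.items_insert_of_contains]
  by_cases h8 : hl = "ids"
  · subst h8; apply PySem.Dict.ext; simp [PySem.Dict.items_insert_of_contains]
  by_cases h9 : hl = "time"
  · subst h9; apply PySem.Dict.ext; simp [PySem.Dict.items_insert_of_contains]
  by_cases h10 : hl = "time_val"
  · subst h10; apply PySem.Dict.ext; simp [PySem.Dict.items_insert_of_contains]
  by_cases h11 : hl = "t"
  · subst h11; apply PySem.Dict.ext; simp [PySem.Dict.items_insert_of_contains]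
  simp [h1, h2, h3, h4, h5, h6, h7, h8, h9, h10, h11, List.contains_eq_mem]

-- Invariant: after folding the cascade over ps, each of the five entries holds the value
-- of the LAST matching column of ps (B's reverse-search characterization).
lemma irradFold_char (ps : List (String × String)) :
    List.foldl (fun r p => irradStepA r p.1 p.2) irradInitA ps
      = PySem.Dict.mk
          [("v_gate", irradPickRaw ps ["vg", "vgs"]),
           ("i_gate", irradPickRaw ps ["ig", "igs"]),
           ("v_drain", irradPickRaw ps ["vd", "vds"]),
           ("i_drain", irradPickRaw ps ["id", "ids"]),
           ("time_val", irradPickRaw ps ["time", "time_val", "t"])] := by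
  induction ps using List.reverseRecOn with
  | nil => decide
  | append_singleton qs p ih =>
    rw [List.foldl_append, ih, List.foldl_cons, List.foldl_nil]
    simp only [irradPickRaw_append]
    show irradStepA _ p.1 p.2 = _
    unfold irradStepA
    exact irradStep_case _ _ _ _ _ (PySem.Str.strip (PySem.Str.lower p.1)) p.2

-- ===== VERDICT =====
theorem map_irrad_columns_spec : Claim_equal_map_irrad_columns := by
  intro headers row _
  show map_irrad_columns headers row = map_irrad_columns_alt headers row
  unfold map_irrad_columns map_irrad_columns_alt
  have hloop := irradLoop_eq headers row 0 irradInitA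
  simp only [Nat.cast_zero] at hloop
  rw [hloop, List.drop_zero, irradFold_char]
  simp [irradSyn, irradPickRaw]
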